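-- pv_equiv track=rewrite | github.com/rin2401/r3jam | hackercup/2021/qualification/consistency_chapter_1.py | solve
-- ===== SOURCE A (Python) =====
-- from collections import Counter
--
-- def solve(text):
--     V = []
--     C = []
--     for t, c in Counter(text).most_common():
--         if t in "AEIOU":
--             V.append((t, c))
--         else:
--             C.append((t, c))
--
--     sC = sum([x[1] for x in C])
--     sV = sum([x[1] for x in V])
--
--     ssC = sC
--     if ssC:
--         ssC -= C[0][1]
--     ssV = sV
--     if ssV:
--         ssV -= V[0][1]
--
--     return min(ssV * 2 + sC, ssC * 2 + sV)
-- ===== SOURCE B (Python) =====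
-- from collections import Counter
--
-- def solve(text):
--     sV = sC = maxV = maxC = 0
--     for t, c in Counter(text).items():
--         if t in "AEIOU":
--             sV += c
--             maxV = max(maxV, c)
--         else:
--             sC += c
--             maxC = max(maxC, c)
--     return min((sV - maxV) * 2 + sC, (sC - maxC) * 2 + sV)
-- ===== Notes on version B (the rewrite author's own statement) =====
-- stated objective: simpler
-- what changed: Replaces most_common() sorting plus two intermediate lists and comprehension-sums with a single pass over Counter items maintaining running sums and running maxima per class.
import Mathlib
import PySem

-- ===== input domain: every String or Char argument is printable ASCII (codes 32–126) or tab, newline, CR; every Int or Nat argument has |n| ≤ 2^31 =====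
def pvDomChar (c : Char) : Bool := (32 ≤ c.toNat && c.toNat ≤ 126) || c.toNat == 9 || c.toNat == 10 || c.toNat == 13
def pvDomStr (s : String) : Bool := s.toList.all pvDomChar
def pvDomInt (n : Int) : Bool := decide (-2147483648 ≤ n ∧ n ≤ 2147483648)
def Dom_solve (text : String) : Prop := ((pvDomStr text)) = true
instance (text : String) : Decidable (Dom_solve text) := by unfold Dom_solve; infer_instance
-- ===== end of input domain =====

-- B replaces most_common() sorting and the two intermediate lists + comprehension-sums
-- with one pass over Counter items keeping running sums and maxima (objective: simpler).


-- ===== PORT A =====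
-- 't in "AEIOU"' on the single-char Python key t is character membership.
-- Python indexes C[0]/V[0] only under 'if ssC:' / 'if ssV:'; since Counter values
-- are ≥ 1 the list is nonempty there, so headD is exact (never the IndexError path).
def solve (text : String) : Int :=
  let mc := PySem.List.sorted (PySem.Dict.counter text.toList).items (fun x => x.2) true
  let VC := mc.foldl
    (fun (acc : List (Char × Int) × List (Char × Int)) tc =>
      if "AEIOU".toList.contains tc.1 then (acc.1 ++ [tc], acc.2) else (acc.1, acc.2 ++ [tc]))
    ([], [])
  let V := VC.1
  let C := VC.2
  let sC := (C.map (fun x => x.2)).sum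
  let sV := (V.map (fun x => x.2)).sum
  let ssC := if sC ≠ 0 then sC - (C.headD ('?', 0)).2 else sC
  let ssV := if sV ≠ 0 then sV - (V.headD ('?', 0)).2 else sV
  min (ssV * 2 + sC) (ssC * 2 + sV)

-- ===== PORT B =====
-- state (sV, sC, maxV, maxC)
def solve_alt (text : String) : Int :=
  let st := (PySem.Dict.counter text.toList).items.foldl
    (fun (s : Int × Int × Int × Int) tc =>
      if "AEIOU".toList.contains tc.1 then
        (s.1 + tc.2, s.2.1, max s.2.2.1 tc.2, s.2.2.2)
      else
        (s.1, s.2.1 + tc.2, s.2.2.1, max s.2.2.2 tc.2))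
    (0, 0, 0, 0)
  min ((st.1 - st.2.2.1) * 2 + st.2.1) ((st.2.1 - st.2.2.2) * 2 + st.1)

-- ===== PRECONDITION & SPEC =====
def Spec_solve (text : String) (out : Int) : Prop := out = solve_alt text
instance (text : String) (out : Int) : Decidable (Spec_solve text out) := by unfold Spec_solve; infer_instance

-- ===== CLAIM (what is proved, stated in full; the proofs are below) =====
def Claim_equal_solve : Prop := ∀ (text : String), Dom_solve text → Spec_solve text (solve text)

-- ===== LEMMAS AND PROOFS =====

-- A's partition loop builds the two filters of its input.
theorem foldA (p : Char × Int → Bool) (l : List (Char × Int))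
    (acc : List (Char × Int) × List (Char × Int)) :
    l.foldl (fun acc tc => if p tc then (acc.1 ++ [tc], acc.2) else (acc.1, acc.2 ++ [tc])) acc
      = (acc.1 ++ l.filter p, acc.2 ++ l.filter (fun tc => !p tc)) := by
  induction l generalizing acc with
  | nil => simp
  | cons h t ih =>
    by_cases hp : p h <;> simp [List.foldl_cons, hp, ih]

-- B's single loop computes the two filtered sums and the two running maxima.
theorem foldB (p : Char × Int → Bool) (l : List (Char × Int)) (s : Int × Int × Int × Int) :
    l.foldl (fun (s : Int × Int × Int × Int) tc =>
        if p tc then (s.1 + tc.2, s.2.1, max s.2.2.1 tc.2, s.2.2.2)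
        else (s.1, s.2.1 + tc.2, s.2.2.1, max s.2.2.2 tc.2)) s
      = (s.1 + ((l.filter p).map (fun x => x.2)).sum,
         s.2.1 + ((l.filter (fun tc => !p tc)).map (fun x => x.2)).sum,
         (l.filter p).foldl (fun a tc => max a tc.2) s.2.2.1,
         (l.filter (fun tc => !p tc)).foldl (fun a tc => max a tc.2) s.2.2.2) := by
  induction l generalizing s with
  | nil => simp
  | cons h t ih =>
    by_cases hp : p h <;>
      simp [List.foldl_cons, hp, ih] <;> ring

-- every Counter item has count ≥ 1
theorem counter_pos (xs : List Char) : ∀ tc ∈ (PySem.Dict.counter xs).items, 1 ≤ tc.2 := by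
  intro tc h
  rw [PySem.Dict.items_counter] at h
  simp only [List.mem_map] at h
  obtain ⟨k, hk, rfl⟩ := h
  have hmem : k ∈ xs := (PySem.Set.mem_ofList _ _).1 hk
  have : 0 < xs.count k := List.count_pos_iff.2 hmem
  show (1 : Int) ≤ (xs.count k : Int)
  exact_mod_cast this

theorem sum_pos_of_ne_nil (v : List (Char × Int)) (hpos : ∀ tc ∈ v, 1 ≤ tc.2) (h : v ≠ []) :
    (v.map (fun x => x.2)).sum ≠ 0 := by
  cases v with
  | nil => exact absurd rfl h
  | cons a t =>
    have h1 : 1 ≤ a.2 := hpos a (List.mem_cons_self ..)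
    have h2 : 0 ≤ (t.map (fun x => x.2)).sum := by
      apply List.sum_nonneg
      intro x hx
      simp only [List.mem_map] at hx
      obtain ⟨y, hy, rfl⟩ := hx
      exact le_trans (by norm_num) (hpos y (List.mem_cons_of_mem _ hy))
    simp only [List.map_cons, List.sum_cons]
    omega

-- the head of the (filtered) count-descending sorted list carries the max count
theorem head_filter_sorted_snd (l : List (Char × Int)) (p : Char × Int → Bool)
    (hpos : ∀ tc ∈ l, 1 ≤ tc.2)
    (h : (PySem.List.sorted l (fun x => x.2) true).filter p ≠ []) :
    (((PySem.List.sorted l (fun x => x.2) true).filter p).headD ('?', 0)).2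
      = (l.filter p).foldl (fun a tc => max a tc.2) 0 := by
  have hperm : (PySem.List.sorted l (fun x => x.2) true).Perm l := PySem.List.sorted_perm ..
  have hpermf : ((PySem.List.sorted l (fun x => x.2) true).filter p).Perm (l.filter p) :=
    hperm.filter p
  have hpw : (PySem.List.sorted l (fun x => x.2) true).Pairwise (fun x y => y.2 ≤ x.2) :=
    PySem.List.sorted_pairwise_rev ..
  have hpwf : ((PySem.List.sorted l (fun x => x.2) true).filter p).Pairwise
      (fun x y => y.2 ≤ x.2) := hpw.filter p
  obtain ⟨a, t, hat⟩ := List.exists_cons_of_ne_nil h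
  rw [hat] at hpermf hpwf ⊢
  simp only [List.headD_cons]
  have hmax : ∀ y ∈ l.filter p, y.2 ≤ a.2 := by
    intro y hy
    have hy' : y ∈ a :: t := hpermf.symm.subset hy
    rcases List.mem_cons.1 hy' with rfl | hyt
    · exact le_refl _
    · exact (List.pairwise_cons.1 hpwf).1 y hyt
  have ha : a ∈ l.filter p := hpermf.subset (List.mem_cons_self ..)
  have ha2 : 1 ≤ a.2 := hpos a (List.mem_of_mem_filter ha)
  apply le_antisymm
  · exact (PySem.List.le_foldl_max_int (l.filter p) (fun tc => tc.2) 0).2 a ha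
  · have hrw : (l.filter p).foldl (fun a tc => max a tc.2) 0
        = ((l.filter p).map (fun tc => tc.2)).foldl max 0 := (List.foldl_map ..).symm
    rw [hrw]
    rcases PySem.List.foldl_max_mem ((l.filter p).map (fun tc => tc.2)) 0 with he | hm
    · rw [he]; omega
    · simp only [List.mem_map] at hm
      obtain ⟨y, hy, hyeq⟩ := hm
      rw [← hyeq]
      exact hmax y hy

theorem solve_eq (text : String) : solve text = solve_alt text := by
  unfold solve solve_alt
  have hpos := counter_pos text.toList
  simp only [foldA, foldB, List.nil_append]
  have hperm : (PySem.List.sorted (PySem.Dict.counter text.toList).items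
      (fun x => x.2) true).Perm (PySem.Dict.counter text.toList).items :=
    PySem.List.sorted_perm ..
  have hposs : ∀ tc ∈ PySem.List.sorted (PySem.Dict.counter text.toList).items
      (fun x => x.2) true, 1 ≤ tc.2 := fun tc htc => hpos tc (hperm.subset htc)
  have key : ∀ p : Char × Int → Bool,
      (((PySem.List.sorted (PySem.Dict.counter text.toList).items (fun x => x.2) true).filter p).map
          (fun x => x.2)).sum
        = (((PySem.Dict.counter text.toList).items.filter p).map (fun x => x.2)).sum ∧
      (if (((PySem.List.sorted (PySem.Dict.counter text.toList).items (fun x => x.2) true).filter p).map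
          (fun x => x.2)).sum ≠ 0 then
        (((PySem.List.sorted (PySem.Dict.counter text.toList).items (fun x => x.2) true).filter p).map
          (fun x => x.2)).sum
          - (((PySem.List.sorted (PySem.Dict.counter text.toList).items (fun x => x.2) true).filter p).headD ('?', 0)).2
      else (((PySem.List.sorted (PySem.Dict.counter text.toList).items (fun x => x.2) true).filter p).map
          (fun x => x.2)).sum)
        = (((PySem.Dict.counter text.toList).items.filter p).map (fun x => x.2)).sum
          - ((PySem.Dict.counter text.toList).items.filter p).foldl (fun a tc => max a tc.2) 0 := by
    intro p
    have hsum : (((PySem.List.sorted (PySem.Dict.counter text.toList).items (fun x => x.2) true).filter p).map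
          (fun x => x.2)).sum
        = (((PySem.Dict.counter text.toList).items.filter p).map (fun x => x.2)).sum :=
      ((hperm.filter p).map _).sum_eq
    refine ⟨hsum, ?_⟩
    by_cases hne : (PySem.List.sorted (PySem.Dict.counter text.toList).items (fun x => x.2) true).filter p = []
    · have h0 : (PySem.Dict.counter text.toList).items.filter p = [] :=
        List.Perm.eq_nil ((hperm.filter p).symm.trans (by rw [hne]))
      simp [hne, h0]
    · have hsne : (((PySem.List.sorted (PySem.Dict.counter text.toList).items (fun x => x.2) true).filter p).map
          (fun x => x.2)).sum ≠ 0 :=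
        sum_pos_of_ne_nil _ (fun tc htc => hposs tc (List.mem_of_mem_filter htc)) hne
      rw [if_pos hsne, hsum, head_filter_sorted_snd _ p hpos hne]
  obtain ⟨hs1, hh1⟩ := key (fun tc => "AEIOU".toList.contains tc.1)
  obtain ⟨hs2, hh2⟩ := key (fun tc => !"AEIOU".toList.contains tc.1)
  rw [hh1, hh2, hs1, hs2]
  simp only [zero_add]

-- ===== VERDICT (by name: the statement is the Claim_ definition above) =====
theorem solve_spec : Claim_equal_solve := by
  intro text _
  exact solve_eq text
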